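-- pv_equiv track=rewrite | github.com/aiaanad/asd-2sem | lab_2/src/task9.py | delNodeWithChildren
-- ===== SOURCE A (Python) =====
-- def delNodeWithChildren(tree, x):
--     if x not in tree:
--         return tree
--     if tree[x][0] is not None:
--         delNodeWithChildren(tree, tree[x][0])
--     if tree[x][1] is not None:
--         delNodeWithChildren(tree, tree[x][1])
--     del tree[x]
--     return tree
-- ===== SOURCE B (Python) =====
-- def delNodeWithChildren(tree, x):
--     if x not in tree:
--         return tree
--     stack = [x]
--     while stack:
--         node = stack.pop()
--         if node not in tree:
--             continue
--         left, right = tree[node]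
--         del tree[node]
--         if right is not None:
--             stack.append(right)
--         if left is not None:
--             stack.append(left)
--     return tree
-- ===== Notes on version B (the rewrite author's own statement) =====
-- stated objective: alternative
-- what changed: Replaces the recursive post-order subtree deletion with an iterative depth-first walk driven by an explicit stack (pop a node, delete it, push its non-None children), which also terminates on cyclic inputs where the recursion blows the stack.
import Mathlib
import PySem

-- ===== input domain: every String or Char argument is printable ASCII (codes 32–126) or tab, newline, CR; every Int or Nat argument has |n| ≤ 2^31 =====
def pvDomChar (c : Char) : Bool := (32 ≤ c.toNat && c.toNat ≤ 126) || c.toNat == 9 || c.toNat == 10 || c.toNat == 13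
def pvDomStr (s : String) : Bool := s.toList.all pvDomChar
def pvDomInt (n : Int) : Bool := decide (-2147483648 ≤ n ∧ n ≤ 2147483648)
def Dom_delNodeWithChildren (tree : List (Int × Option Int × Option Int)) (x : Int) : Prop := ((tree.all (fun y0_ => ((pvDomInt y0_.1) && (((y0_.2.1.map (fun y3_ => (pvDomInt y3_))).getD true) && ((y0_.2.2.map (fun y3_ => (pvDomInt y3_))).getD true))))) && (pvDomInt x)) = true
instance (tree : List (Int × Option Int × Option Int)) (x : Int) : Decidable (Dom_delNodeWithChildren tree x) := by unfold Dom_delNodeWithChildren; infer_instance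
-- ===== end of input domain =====

-- B replaces A's recursive post-order subtree deletion by an iterative depth-first walk over
-- an explicit stack (alternative decomposition, not claimed faster).  Both Pythons mutate
-- `tree` in place and return it; the final state is the same, only the deletion order differs.

-- The tree argument is a dict in insertion order (unique keys, see Pre_): first-match lookup
-- ('tree[k]' / 'k in tree') and key deletion ('del tree[k]') are exact on such lists.
def pvLookup (d : List (Int × Option Int × Option Int)) (k : Int) : Option (Option Int × Option Int) :=
  match d with
  | [] => none
  | (k', v) :: rest => if k' = k then some v else pvLookup rest k

def pvDel (d : List (Int × Option Int × Option Int)) (k : Int) : List (Int × Option Int × Option Int) :=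
  d.filter (fun kv => kv.1 != k)

def treeKeys (d : List (Int × Option Int × Option Int)) : List Int := d.map Prod.fst

-- needed by delLoop's termination proof
theorem pvDel_length_lt (d : List (Int × Option Int × Option Int)) (k : Int) (v : Option Int × Option Int)
    (h : pvLookup d k = some v) : (pvDel d k).length < d.length := by
  induction d with
  | nil => simp [pvLookup] at h
  | cons p rest ih =>
    obtain ⟨k', v'⟩ := p
    by_cases hk : k' = k
    · have hle : (List.filter (fun kv => kv.1 != k) rest).length ≤ rest.length :=
        List.length_filter_le _ _
      simp only [pvDel, List.filter_cons, hk, bne_self_eq_false, List.length_cons]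
      simpa using Nat.lt_succ_of_le hle
    · have h' : pvLookup rest k = some v := by simpa [pvLookup, hk] using h
      have := ih h'
      simp only [pvDel, List.filter_cons] at *
      have hb : (k' != k) = true := by simpa using hk
      rw [hb]
      simpa using Nat.succ_lt_succ this

-- ===== PORT A =====
-- A's recursion is ported with a fuel parameter: on inputs satisfying Pre_ (distinct keys,
-- no cycle reachable from x) the recursion depth is bounded by the number of keys, so the
-- initial fuel tree.length + 1 is never exhausted (the 0-fuel branch is dead under Pre_).
def delFuel : Nat → List (Int × Option Int × Option Int) → Int → List (Int × Option Int × Option Int)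
  | 0, d, _ => d
  | f+1, d, x =>
    match pvLookup d x with
    | none => d                                   -- if x not in tree: return tree
    | some (l, r) =>
      let d1 := match l with                      -- if tree[x][0] is not None: recurse
        | some c => delFuel f d c
        | none => d
      let d2 := match r with                      -- if tree[x][1] is not None: recurse
        | some c => delFuel f d1 c
        | none => d1
      pvDel d2 x                                  -- del tree[x]

def delNodeWithChildren (tree : List (Int × Option Int × Option Int)) (x : Int) : List (Int × Option Int × Option Int) :=
  delFuel (tree.length + 1) tree x

-- ===== PORT B =====
-- Python's stack is a list with push/pop at the END; here the stack is a list with the TOP AT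
-- THE HEAD (same LIFO discipline): pushing right then left = l.toList ++ (r.toList ++ rest),
-- so the left child is popped first, exactly as in Source B.
def delLoop (d : List (Int × Option Int × Option Int)) (stack : List Int) : List (Int × Option Int × Option Int) :=
  match stack with
  | [] => d
  | node :: rest =>
    match h : pvLookup d node with
    | none => delLoop d rest                      -- if node not in tree: continue
    | some (l, r) =>                              -- left, right = tree[node]
      delLoop (pvDel d node) (l.toList ++ (r.toList ++ rest))   -- del tree[node]; push right; push left
termination_by 3 * d.length + stack.length
decreasing_by
  · simp only [List.length_cons]
    omega
  · have h1 := pvDel_length_lt d node _ h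
    have h2 : l.toList.length ≤ 1 := by cases l <;> simp
    have h3 : r.toList.length ≤ 1 := by cases r <;> simp
    simp only [List.length_append, List.length_cons]
    omega

def delNodeWithChildren_alt (tree : List (Int × Option Int × Option Int)) (x : Int) : List (Int × Option Int × Option Int) :=
  match pvLookup tree x with
  | none => tree                                  -- if x not in tree: return tree
  | some _ => delLoop tree [x]

-- ===== PRECONDITION & SPEC =====
-- Closed-form data for Pre_: the children of a node, and the set of nodes reachable from x
-- through keys of the tree, computed as the fixpoint of one expansion step (reached after at
-- most tree.length rounds).
def pvChildKeys (d : List (Int × Option Int × Option Int)) (k : Int) : List Int :=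
  match pvLookup d k with
  | some (l, r) => l.toList ++ r.toList
  | none => []

def pvStep (d : List (Int × Option Int × Option Int)) (s : Finset Int) : Finset Int :=
  s ∪ (treeKeys d).toFinset.filter (fun c => ∃ p ∈ s, c ∈ pvChildKeys d p)

def pvIter (d : List (Int × Option Int × Option Int)) (s0 : Finset Int) : Nat → Finset Int
  | 0 => s0
  | k+1 => pvStep d (pvIter d s0 k)

def pvClos (d : List (Int × Option Int × Option Int)) (x : Int) : Finset Int :=
  pvIter d (if pvLookup d x = none then ∅ else {x}) d.length

-- Pre_: the list represents a dict (distinct keys), and the subgraph of nodes reachable from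
-- x is acyclic — exactly the inputs on which Python A returns instead of raising
-- RecursionError (a cycle reachable from x makes A recurse forever).
def Pre_delNodeWithChildren (tree : List (Int × Option Int × Option Int)) (x : Int) : Prop :=
  (treeKeys tree).Nodup ∧ ∀ k ∈ pvClos tree x, ∀ c ∈ pvChildKeys tree k, k ∉ pvClos tree c
instance (tree : List (Int × Option Int × Option Int)) (x : Int) : Decidable (Pre_delNodeWithChildren tree x) := by unfold Pre_delNodeWithChildren; infer_instance

def pvWitness_delNodeWithChildren : (List (Int × Option Int × Option Int)) × Int :=
  ([(1, (some 2, none)), (2, (none, none)), (3, (none, some 1))], 1)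

def Spec_delNodeWithChildren (tree : List (Int × Option Int × Option Int)) (x : Int) (out : List (Int × Option Int × Option Int)) : Prop := out = delNodeWithChildren_alt tree x
instance (tree : List (Int × Option Int × Option Int)) (x : Int) (out : List (Int × Option Int × Option Int)) : Decidable (Spec_delNodeWithChildren tree x out) := by unfold Spec_delNodeWithChildren; infer_instance

-- ===== CLAIM (what is proved, stated in full; the proofs are below) =====
def Claim_equal_delNodeWithChildren : Prop := ∀ (tree : List (Int × Option Int × Option Int)) (x : Int), Dom_delNodeWithChildren tree x → Pre_delNodeWithChildren tree x → Spec_delNodeWithChildren tree x (delNodeWithChildren tree x)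


-- ===== LEMMAS AND PROOFS =====

-- ---- basic facts about pvLookup / pvDel / treeKeys ----

theorem lookup_isSome_iff {d : List (Int × Option Int × Option Int)} {k : Int} :
    pvLookup d k ≠ none ↔ k ∈ treeKeys d := by
  induction d with
  | nil => simp [pvLookup, treeKeys]
  | cons p rest ih =>
    obtain ⟨k', v'⟩ := p
    by_cases hk : k' = k
    · subst hk; simp [pvLookup, treeKeys]
    · have h1 : (k ∈ treeKeys ((k', v') :: rest)) ↔ k ∈ treeKeys rest := by
        simp [treeKeys, Ne.symm hk]
      rw [h1, ← ih]
      simp [pvLookup, hk]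

theorem lookup_mem {d : List (Int × Option Int × Option Int)} {k : Int} {v}
    (h : pvLookup d k = some v) : (k, v) ∈ d := by
  induction d with
  | nil => simp [pvLookup] at h
  | cons p rest ih =>
    obtain ⟨k', v'⟩ := p
    by_cases hk : k' = k
    · subst hk
      simp only [pvLookup, if_pos trivial] at h
      simp only [Option.some.injEq] at h
      subst h
      exact List.mem_cons_self ..
    · simp only [pvLookup, if_neg hk] at h
      exact List.mem_cons_of_mem _ (ih h)

theorem mem_lookup {d : List (Int × Option Int × Option Int)} {k : Int} {v}
    (hnd : (treeKeys d).Nodup) (h : (k, v) ∈ d) : pvLookup d k = some v := by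
  induction d with
  | nil => simp at h
  | cons p rest ih =>
    obtain ⟨k', v'⟩ := p
    simp only [treeKeys, List.map_cons, List.nodup_cons] at hnd
    rcases List.mem_cons.mp h with heq | hmem
    · simp only [Prod.mk.injEq] at heq
      obtain ⟨rfl, rfl⟩ := heq
      simp [pvLookup]
    · have hk : k' ≠ k := by
        rintro rfl
        exact hnd.1 (List.mem_map_of_mem hmem)
      simp only [pvLookup, if_neg hk]
      exact ih hnd.2 hmem

theorem lookup_pvDel (d : List (Int × Option Int × Option Int)) (a k : Int) :
    pvLookup (pvDel d a) k = if k = a then none else pvLookup d k := by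
  induction d with
  | nil => simp [pvDel, pvLookup]
  | cons p rest ih =>
    obtain ⟨k', v'⟩ := p
    by_cases ha : k' = a
    · have hcons : pvDel ((k', v') :: rest) a = pvDel rest a := by
        simp [pvDel, List.filter_cons, ha]
      rw [hcons, ih]
      by_cases hk : k = a
      · simp [hk]
      · have hkk : k' ≠ k := by rw [ha]; exact fun h => hk h.symm
        simp [hk, pvLookup, hkk]
    · have hcons : pvDel ((k', v') :: rest) a = (k', v') :: pvDel rest a := by
        simp [pvDel, List.filter_cons, ha]
      rw [hcons]
      by_cases hk' : k' = k
      · subst hk'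
        have hka : ¬ (k' = a) := ha
        simp [pvLookup, hka]
      · simp [pvLookup, hk', ih]

theorem pvDel_sublist (d : List (Int × Option Int × Option Int)) (a : Int) : List.Sublist (pvDel d a) d :=
  List.filter_sublist

theorem pvDel_comm (d : List (Int × Option Int × Option Int)) (a b : Int) :
    pvDel (pvDel d a) b = pvDel (pvDel d b) a := by
  simp only [pvDel, List.filter_filter]
  congr 1
  funext kv
  exact Bool.and_comm _ _

theorem nodup_sub {d' d : List (Int × Option Int × Option Int)}
    (hnd : (treeKeys d).Nodup) (hs : List.Sublist d' d) : (treeKeys d').Nodup :=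
  List.Nodup.sublist (List.Sublist.map Prod.fst hs) hnd

theorem lookup_sublist_some {d' d : List (Int × Option Int × Option Int)} {k : Int} {v}
    (hs : List.Sublist d' d) (hnd : (treeKeys d).Nodup) (h : pvLookup d' k = some v) :
    pvLookup d k = some v :=
  mem_lookup hnd (hs.subset (lookup_mem h))

theorem lookup_sublist_ne {d' d : List (Int × Option Int × Option Int)} {k : Int}
    (hs : List.Sublist d' d) (hnd : (treeKeys d).Nodup) (h : pvLookup d' k ≠ none) :
    pvLookup d k ≠ none := by
  cases hv : pvLookup d' k with
  | none => exact absurd hv h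
  | some v => simp [lookup_sublist_some hs hnd hv]

-- ---- unfolding equations for the ports ----

theorem delFuel_not_key {d : List (Int × Option Int × Option Int)} {c : Int}
    (f : Nat) (h : pvLookup d c = none) : delFuel f d c = d := by
  cases f <;> simp [delFuel, h]

theorem delFuel_sublist : ∀ (f : Nat) (d : List (Int × Option Int × Option Int)) (x : Int),
    List.Sublist (delFuel f d x) d := by
  intro f
  induction f with
  | zero => intro d x; exact List.Sublist.refl d
  | succ f ih =>
    intro d x
    cases hl : pvLookup d x with
    | none => simp only [delFuel, hl]; exact List.Sublist.refl d
    | some lr =>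
      obtain ⟨l, r⟩ := lr
      cases l with
      | none =>
        cases r with
        | none => simp only [delFuel, hl]; exact pvDel_sublist d x
        | some c2 =>
          simp only [delFuel, hl]
          exact (pvDel_sublist _ x).trans (ih d c2)
      | some c =>
        cases r with
        | none =>
          simp only [delFuel, hl]
          exact (pvDel_sublist _ x).trans (ih d c)
        | some c2 =>
          simp only [delFuel, hl]
          exact (pvDel_sublist _ x).trans ((ih (delFuel f d c) c2).trans (ih d c))

theorem delLoop_nil (d : List (Int × Option Int × Option Int)) : delLoop d [] = d := by
  rw [delLoop]

theorem delLoop_skip {d : List (Int × Option Int × Option Int)} {n : Int} {st : List Int}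
    (h : pvLookup d n = none) : delLoop d (n :: st) = delLoop d st := by
  rw [delLoop]
  split
  · rfl
  · simp_all

theorem delLoop_key {d : List (Int × Option Int × Option Int)} {n : Int} {st : List Int}
    {l r : Option Int} (h : pvLookup d n = some (l, r)) :
    delLoop d (n :: st) = delLoop (pvDel d n) (l.toList ++ (r.toList ++ st)) := by
  rw [delLoop]
  split
  · simp_all
  · next l' r' heq =>
    rw [h] at heq
    obtain ⟨rfl, rfl⟩ : l = l' ∧ r = r' := by simpa using heq
    rfl

theorem delLoop_append (d : List (Int × Option Int × Option Int)) (p q : List Int) :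
    delLoop d (p ++ q) = delLoop (delLoop d p) q := by
  induction d, p using delLoop.induct with
  | case1 d => rw [delLoop_nil]; rfl
  | case2 d node rest h ih =>
    rw [List.cons_append, delLoop_skip h, delLoop_skip h, ih]
  | case3 d node rest l r h ih =>
    rw [List.cons_append, delLoop_key h, delLoop_key h, ← ih]
    congr 1
    simp [List.append_assoc]

-- ---- the reachability relation, and soundness of Pre_'s acyclicity check ----

def EdgeP (d : List (Int × Option Int × Option Int)) (p c : Int) : Prop :=
  c ∈ pvChildKeys d p ∧ pvLookup d c ≠ none

inductive ReachP (d : List (Int × Option Int × Option Int)) : Int → Int → Prop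
  | refl (x : Int) : pvLookup d x ≠ none → ReachP d x x
  | step (x y z : Int) : EdgeP d x y → ReachP d y z → ReachP d x z

def AcycP (d : List (Int × Option Int × Option Int)) (x : Int) : Prop :=
  ∀ y z, ReachP d x y → EdgeP d y z → ¬ ReachP d z y

def RSet (d : List (Int × Option Int × Option Int)) (x : Int) : Set Int := {k | ReachP d x k}

theorem childKeys_lookup {d : List (Int × Option Int × Option Int)} {p c : Int}
    (h : c ∈ pvChildKeys d p) :
    ∃ l r, pvLookup d p = some (l, r) ∧ (l = some c ∨ r = some c) := by
  unfold pvChildKeys at h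
  cases hp : pvLookup d p with
  | none => rw [hp] at h; simp at h
  | some v =>
    obtain ⟨l, r⟩ := v
    rw [hp] at h
    simp only [List.mem_append, Option.mem_toList, Option.mem_def] at h
    exact ⟨l, r, rfl, h⟩

theorem childKeys_src {d : List (Int × Option Int × Option Int)} {p c : Int}
    (h : c ∈ pvChildKeys d p) : pvLookup d p ≠ none := by
  obtain ⟨l, r, hp, _⟩ := childKeys_lookup h
  simp [hp]

theorem reach_src_key {d : List (Int × Option Int × Option Int)} {x y : Int}
    (h : ReachP d x y) : pvLookup d x ≠ none := by
  cases h with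
  | refl _ hx => exact hx
  | step _ y' _ e _ => exact childKeys_src e.1

theorem reach_tgt_key {d : List (Int × Option Int × Option Int)} {x y : Int}
    (h : ReachP d x y) : pvLookup d y ≠ none := by
  induction h with
  | refl _ hx => exact hx
  | step _ _ _ _ _ ih => exact ih

theorem edge_mono {d' d : List (Int × Option Int × Option Int)} {p c : Int}
    (hs : List.Sublist d' d) (hnd : (treeKeys d).Nodup) (h : EdgeP d' p c) : EdgeP d p c := by
  obtain ⟨hc, hk⟩ := h
  obtain ⟨l, r, hp, hlr⟩ := childKeys_lookup hc
  have hp' : pvLookup d p = some (l, r) := lookup_sublist_some hs hnd hp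
  refine ⟨?_, lookup_sublist_ne hs hnd hk⟩
  unfold pvChildKeys
  rw [hp']
  rcases hlr with h | h <;> simp [h]

theorem reach_mono {d' d : List (Int × Option Int × Option Int)} {x y : Int}
    (hs : List.Sublist d' d) (hnd : (treeKeys d).Nodup) (h : ReachP d' x y) : ReachP d x y := by
  induction h with
  | refl a ha => exact ReachP.refl a (lookup_sublist_ne hs hnd ha)
  | step a b c e _ ih => exact ReachP.step a b c (edge_mono hs hnd e) ih

theorem reach_in_closed {d : List (Int × Option Int × Option Int)} {S : Int → Prop}
    (hcl : ∀ k, S k → ∀ c, EdgeP d k c → S c) {a b : Int} (h : ReachP d a b) : S a → S b := by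
  induction h with
  | refl x hx => exact id
  | step x y z e _ ih => exact fun hS => ih (hcl x hS y e)

theorem acyc_step {d : List (Int × Option Int × Option Int)} {x c : Int}
    (h : AcycP d x) (e : EdgeP d x c) : AcycP d c :=
  fun y z h1 h2 h3 => h y z (ReachP.step x c y e h1) h2 h3

theorem acyc_mono {d' d : List (Int × Option Int × Option Int)} {x : Int}
    (hs : List.Sublist d' d) (hnd : (treeKeys d).Nodup) (h : AcycP d x) : AcycP d' x :=
  fun y z h1 h2 h3 =>
    h y z (reach_mono hs hnd h1) (edge_mono hs hnd h2) (reach_mono hs hnd h3)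

theorem rset_finite (d : List (Int × Option Int × Option Int)) (x : Int) : (RSet d x).Finite :=
  Set.Finite.subset (List.finite_toSet (treeKeys d))
    (fun k hk => lookup_isSome_iff.mp (reach_tgt_key hk))

-- ---- the closure computation of Pre_ reaches its fixpoint ----

theorem pvIter_succ (d : List (Int × Option Int × Option Int)) (s0 : Finset Int) (k : Nat) :
    pvIter d s0 (k+1) = pvStep d (pvIter d s0 k) := rfl

theorem subset_pvStep (d : List (Int × Option Int × Option Int)) (s : Finset Int) :
    s ⊆ pvStep d s := Finset.subset_union_left

theorem pvIter_mono_succ (d : List (Int × Option Int × Option Int)) (s0 : Finset Int) (k : Nat) :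
    pvIter d s0 k ⊆ pvIter d s0 (k+1) := by
  rw [pvIter_succ]; exact subset_pvStep _ _

theorem s0_subset_pvIter (d : List (Int × Option Int × Option Int)) (s0 : Finset Int) :
    ∀ k, s0 ⊆ pvIter d s0 k := by
  intro k
  induction k with
  | zero => exact subset_refl _
  | succ k ih => exact ih.trans (pvIter_mono_succ d s0 k)

theorem pvIter_subset_keys {d : List (Int × Option Int × Option Int)} {s0 : Finset Int}
    (h : s0 ⊆ (treeKeys d).toFinset) : ∀ k, pvIter d s0 k ⊆ (treeKeys d).toFinset := by
  intro k
  induction k with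
  | zero => exact h
  | succ k ih =>
    rw [pvIter_succ]
    unfold pvStep
    exact Finset.union_subset ih (Finset.filter_subset _ _)

theorem pvIter_stab {d : List (Int × Option Int × Option Int)} {s0 : Finset Int} {k : Nat}
    (hk : pvIter d s0 k = pvIter d s0 (k+1)) :
    ∀ j, k ≤ j → pvIter d s0 j = pvIter d s0 k := by
  intro j hj
  induction j, hj using Nat.le_induction with
  | base => rfl
  | succ j hj ih => rw [pvIter_succ, ih, ← pvIter_succ, ← hk]

theorem pvIter_growth {d : List (Int × Option Int × Option Int)} {s0 : Finset Int} :
    ∀ m, (∀ k, k < m → pvIter d s0 k ≠ pvIter d s0 (k+1)) → m ≤ (pvIter d s0 m).card := by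
  intro m
  induction m with
  | zero => intro _; exact Nat.zero_le _
  | succ m ih =>
    intro h
    have h1 : pvIter d s0 m ⊂ pvIter d s0 (m+1) :=
      HasSubset.Subset.ssubset_of_ne (pvIter_mono_succ d s0 m) (h m (Nat.lt_succ_self m))
    have h2 := Finset.card_lt_card h1
    have h3 := ih (fun k hk => h k (Nat.lt_succ_of_lt hk))
    omega

theorem pvClos_fixed (d : List (Int × Option Int × Option Int)) (x : Int) :
    pvClos d x = pvStep d (pvClos d x) := by
  unfold pvClos
  set s0 := (if pvLookup d x = none then (∅ : Finset Int) else {x}) with hs0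
  have hs0k : s0 ⊆ (treeKeys d).toFinset := by
    rw [hs0]
    split
    · simp
    · next h =>
      rw [Finset.singleton_subset_iff, List.mem_toFinset]
      exact lookup_isSome_iff.mp h
  set n := d.length with hn
  have hex : ∃ k, k ≤ n ∧ pvIter d s0 k = pvIter d s0 (k+1) := by
    by_contra hno
    push_neg at hno
    have h1 := pvIter_growth (d := d) (s0 := s0) (n+1)
      (fun k hk => hno k (Nat.lt_succ_iff.mp hk))
    have h2 := Finset.card_le_card (pvIter_subset_keys hs0k (n+1))
    have h3 := List.toFinset_card_le (treeKeys d)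
    have h4 : (treeKeys d).length = n := by simp [treeKeys, hn]
    omega
  obtain ⟨k, hk, hfix⟩ := hex
  have h5 := pvIter_stab hfix n hk
  have h6 := pvIter_stab hfix (n+1) (Nat.le_succ_of_le hk)
  calc pvIter d s0 n = pvIter d s0 (n+1) := by rw [h5, h6]
    _ = pvStep d (pvIter d s0 n) := pvIter_succ ..

theorem clos_start {d : List (Int × Option Int × Option Int)} {x : Int}
    (h : pvLookup d x ≠ none) : x ∈ pvClos d x := by
  unfold pvClos
  have hx : x ∈ (if pvLookup d x = none then (∅ : Finset Int) else {x}) := by simp [h]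
  exact s0_subset_pvIter _ _ _ hx

theorem clos_closed {d : List (Int × Option Int × Option Int)} {x k c : Int}
    (hk : k ∈ pvClos d x) (he : EdgeP d k c) : c ∈ pvClos d x := by
  rw [pvClos_fixed]
  unfold pvStep
  refine Finset.mem_union_right _ ?_
  rw [Finset.mem_filter]
  exact ⟨List.mem_toFinset.mpr (lookup_isSome_iff.mp he.2), ⟨k, hk, he.1⟩⟩

theorem reach_mem_clos {d : List (Int × Option Int × Option Int)} {a b : Int}
    (h : ReachP d a b) : b ∈ pvClos d a :=
  reach_in_closed (fun k hk c he => clos_closed hk he) h (clos_start (reach_src_key h))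

theorem acyc_of_pre {tree : List (Int × Option Int × Option Int)} {x : Int}
    (hpre : Pre_delNodeWithChildren tree x) : AcycP tree x := by
  obtain ⟨hnd, hphi⟩ := hpre
  intro y z h1 h2 h3
  exact hphi y (reach_mem_clos h1) z h2.1 (reach_mem_clos h3)

-- ---- the two ports compute the same dict ----

-- deleting the subtree below y commutes with removing an unreachable key a
theorem delFuel_del_comm : ∀ (f : Nat) (d : List (Int × Option Int × Option Int)) (y a : Int),
    (treeKeys d).Nodup → a ≠ y → ¬ ReachP d y a →
    delFuel f (pvDel d a) y = pvDel (delFuel f d y) a := by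
  intro f
  induction f with
  | zero => intro d y a _ _ _; rfl
  | succ f ih =>
    intro d y a hnd hay hnr
    have hly : pvLookup (pvDel d a) y = pvLookup d y := by
      have hya : y ≠ a := fun h => hay h.symm
      rw [lookup_pvDel, if_neg hya]
    cases hl : pvLookup d y with
    | none =>
      rw [delFuel_not_key _ (hly.trans hl), delFuel_not_key _ hl]
    | some lr =>
      obtain ⟨l, r⟩ := lr
      have hykey : pvLookup d y ≠ none := by simp [hl]
      -- one child: the subtree deletion from child c of y commutes with removing a,
      -- for any sub-dict d0 of d in which the recursion currently runs
      have hchild : ∀ (d0 : List (Int × Option Int × Option Int)) (c : Int), List.Sublist d0 d →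
          (l = some c ∨ r = some c) →
          delFuel f (pvDel d0 a) c = pvDel (delFuel f d0 c) a := by
        intro d0 c hs0 hlr
        have hnd0 : (treeKeys d0).Nodup := nodup_sub hnd hs0
        cases hc : pvLookup d0 c with
        | none =>
          have hc' : pvLookup (pvDel d0 a) c = none := by
            rw [lookup_pvDel]
            split
            · rfl
            · exact hc
          rw [delFuel_not_key _ hc', delFuel_not_key _ hc]
        | some vc =>
          have hckey : pvLookup d c ≠ none := by
            simp [lookup_sublist_some hs0 hnd hc]
          have hedge : EdgeP d y c := by
            refine ⟨?_, hckey⟩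
            unfold pvChildKeys
            rw [hl]
            rcases hlr with h | h <;> simp [h]
          have hreach : ReachP d y c := ReachP.step y c c hedge (ReachP.refl c hckey)
          have hac : a ≠ c := by
            rintro rfl
            exact hnr hreach
          have hnrc : ¬ ReachP d0 c a := fun hr =>
            hnr (ReachP.step y c a hedge (reach_mono hs0 hnd hr))
          exact ih d0 c a hnd0 hac hnrc
      cases l with
      | none =>
        cases r with
        | none =>
          simp only [delFuel, hly, hl]
          exact pvDel_comm d a y
        | some c2 =>
          simp only [delFuel, hly, hl]
          rw [hchild d c2 (List.Sublist.refl d) (Or.inr rfl)]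
          exact pvDel_comm _ a y
      | some c =>
        have h1 : delFuel f (pvDel d a) c = pvDel (delFuel f d c) a :=
          hchild d c (List.Sublist.refl d) (Or.inl rfl)
        cases r with
        | none =>
          simp only [delFuel, hly, hl]
          rw [h1]
          exact pvDel_comm _ a y
        | some c2 =>
          simp only [delFuel, hly, hl]
          rw [h1, hchild (delFuel f d c) c2 (delFuel_sublist f d c) (Or.inr rfl)]
          exact pvDel_comm _ a y

-- main equivalence, by induction on the fuel with the reachable set shrinking
theorem pv_main : ∀ (f : Nat) (d : List (Int × Option Int × Option Int)) (x : Int),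
    (treeKeys d).Nodup → AcycP d x → (RSet d x).ncard < f →
    delFuel f d x = delLoop d [x] := by
  intro f
  induction f with
  | zero => intro d x _ _ h; exact absurd h (Nat.not_lt_zero _)
  | succ f ih =>
    intro d x hnd hac hcard
    cases hl : pvLookup d x with
    | none =>
      rw [delLoop_skip hl, delLoop_nil]
      simp [delFuel, hl]
    | some lr =>
      obtain ⟨l, r⟩ := lr
      have hxkey : pvLookup d x ≠ none := by simp [hl]
      have hxmem : x ∈ RSet d x := ReachP.refl x hxkey
      have hfin : (RSet d x).Finite := rset_finite d x
      -- processing one pushed child c on the current sub-dict d' equals A's recursive call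
      have child : ∀ (d' : List (Int × Option Int × Option Int)) (c : Int), List.Sublist d' d →
          (l = some c ∨ r = some c) →
          delLoop (pvDel d' x) [c] = pvDel (delFuel f d' c) x := by
        intro d' c hs hlr
        have hnd' : (treeKeys d').Nodup := nodup_sub hnd hs
        cases hc : pvLookup d' c with
        | none =>
          have hc' : pvLookup (pvDel d' x) c = none := by
            rw [lookup_pvDel]
            split
            · rfl
            · exact hc
          rw [delLoop_skip hc', delLoop_nil, delFuel_not_key _ hc]
        | some vc =>
          have hckey : pvLookup d c ≠ none := by
            simp [lookup_sublist_some hs hnd hc]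
          have hedge : EdgeP d x c := by
            refine ⟨?_, hckey⟩
            unfold pvChildKeys
            rw [hl]
            rcases hlr with h | h <;> simp [h]
          have hncx : ¬ ReachP d c x := hac x c (ReachP.refl x hxkey) hedge
          have hxc : x ≠ c := by
            rintro rfl
            exact hncx (ReachP.refl x hxkey)
          have hsdx : List.Sublist (pvDel d' x) d := (pvDel_sublist d' x).trans hs
          have hac' : AcycP (pvDel d' x) c := acyc_mono hsdx hnd (acyc_step hac hedge)
          have hsub : RSet (pvDel d' x) c ⊆ RSet d x \ {x} := by
            intro k hk
            have hk' : ReachP d c k := reach_mono hsdx hnd hk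
            refine ⟨ReachP.step x c k hedge hk', ?_⟩
            have h1 : pvLookup (pvDel d' x) k ≠ none := reach_tgt_key hk
            have h2 : pvLookup (pvDel d' x) x = none := by rw [lookup_pvDel]; simp
            simp only [Set.mem_singleton_iff]
            rintro rfl
            exact h1 h2
          have hcard' : (RSet (pvDel d' x) c).ncard < f := by
            have c1 : (RSet (pvDel d' x) c).ncard ≤ (RSet d x \ {x}).ncard :=
              Set.ncard_le_ncard hsub (hfin.diff)
            have c2 : (RSet d x \ {x}).ncard < (RSet d x).ncard :=
              Set.ncard_lt_ncard
                ((Set.ssubset_iff_of_subset Set.diff_subset).mpr ⟨x, hxmem, by simp⟩) hfin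
            omega
          have hih := ih (pvDel d' x) c (nodup_sub hnd hsdx) hac' hcard'
          rw [← hih]
          exact delFuel_del_comm f d' c x hnd' hxc
            (fun hr => hncx (reach_mono hs hnd hr))
      rw [delLoop_key hl, delLoop_append, List.append_nil]
      cases l with
      | none =>
        cases r with
        | none =>
          simp only [Option.toList_none]
          rw [delLoop_nil, delLoop_nil]
          simp [delFuel, hl]
        | some c2 =>
          simp only [Option.toList_none, Option.toList_some]
          rw [delLoop_nil, child d c2 (List.Sublist.refl d) (Or.inr rfl)]
          simp [delFuel, hl]
      | some c =>
        cases r with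
        | none =>
          simp only [Option.toList_none, Option.toList_some]
          rw [delLoop_nil, child d c (List.Sublist.refl d) (Or.inl rfl)]
          simp [delFuel, hl]
        | some c2 =>
          simp only [Option.toList_none, Option.toList_some]
          rw [child d c (List.Sublist.refl d) (Or.inl rfl),
              child (delFuel f d c) c2 (delFuel_sublist f d c) (Or.inr rfl)]
          simp [delFuel, hl]

-- ===== VERDICT (by name: the statement is the Claim_ definition above) =====
theorem delNodeWithChildren_spec : Claim_equal_delNodeWithChildren := by
  intro tree x _ hpre
  unfold Spec_delNodeWithChildren
  have hnd := hpre.1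
  have hac := acyc_of_pre hpre
  have hcard : (RSet tree x).ncard < tree.length + 1 := by
    have h1 : RSet tree x ⊆ ↑(treeKeys tree).toFinset := by
      intro k hk
      rw [Finset.mem_coe, List.mem_toFinset]
      exact lookup_isSome_iff.mp (reach_tgt_key hk)
    have h2 := Set.ncard_le_ncard h1 (treeKeys tree).toFinset.finite_toSet
    rw [Set.ncard_coe_finset] at h2
    have h3 := List.toFinset_card_le (treeKeys tree)
    have h4 : (treeKeys tree).length = tree.length := by simp [treeKeys]
    omega
  have hmain := pv_main (tree.length + 1) tree x hnd hac hcard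
  unfold delNodeWithChildren delNodeWithChildren_alt
  cases hl : pvLookup tree x with
  | none => simp only [delFuel, hl]
  | some v => rw [hmain]
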